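-- pv_equiv track=rewrite | github.com/fbonhomm/Burrows-Wheeler-Transform--ARCHIVE | test_reverse_without_key.py | table1
-- ===== SOURCE A (Python) =====
-- def table1(txt):
--     occ = dict()
--     info = list()
--
--     for i in range(0, len(txt)):
--         if txt[i] in occ:
--             occ[txt[i]] += 1
--         else:
--             occ[txt[i]] = 0
--         info.append((i, txt[i], occ[txt[i]]))
--     return info, sorted(occ.items())
-- ===== SOURCE B (Python) =====
-- def table1(txt):
--     info = [(i, c, txt[:i].count(c)) for i, c in enumerate(txt)]
--     counts = sorted((c, txt.count(c) - 1) for c in set(txt))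
--     return info, counts
-- ===== Notes on version B (the rewrite author's own statement) =====
-- stated objective: simpler
-- what changed: Replaces A's running dict-of-counters loop by two closed-form comprehensions: each rank is the count of the character in the prefix txt[:i], and the counts list is built directly from set(txt) with count(txt)-1; trades A's O(n) single pass for O(n^2) prefix counting.
import Mathlib
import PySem

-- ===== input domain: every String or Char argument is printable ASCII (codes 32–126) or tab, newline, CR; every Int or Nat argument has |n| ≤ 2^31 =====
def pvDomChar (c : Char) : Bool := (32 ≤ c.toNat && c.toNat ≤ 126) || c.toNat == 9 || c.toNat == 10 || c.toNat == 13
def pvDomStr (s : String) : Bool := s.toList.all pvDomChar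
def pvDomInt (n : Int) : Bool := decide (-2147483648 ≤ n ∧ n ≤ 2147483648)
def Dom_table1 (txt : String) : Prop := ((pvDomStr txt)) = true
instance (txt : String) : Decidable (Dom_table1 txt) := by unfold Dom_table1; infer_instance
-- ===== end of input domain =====

-- B replaces A's running dict-of-counters single pass by two closed-form comprehensions
-- (rank i = count of txt[i] in txt[:i]; counts from set(txt)); simpler, not faster.

-- ===== PORT A =====
-- loop body of A's 'for i in range(0, len(txt))'; occ[c] += 1 / occ[c] = 0 / occ[c] read
-- (occ[c] is read only when c is guaranteed present, so getD's default is never used)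
def table1Step (txt : String) (st : PySem.Dict String Int × List (Int × String × Int)) (i : Int) :
    PySem.Dict String Int × List (Int × String × Int) :=
  match PySem.Str.pyGet? txt i with
  | none => st   -- unreachable: i ranges over range(0, len(txt))
  | some ch =>
    let c := String.ofList [ch]
    let occ := if st.1.contains c
               then st.1.insert c (st.1.getD c 0 + 1)
               else st.1.insert c 0
    (occ, st.2 ++ [(i, c, occ.getD c 0)])

def table1 (txt : String) : (List (Int × String × Int)) × (List (String × Int)) :=
  let st := (PySem.List.pyRange 0 (PySem.Str.len txt)).foldl (table1Step txt)
              (PySem.Dict.empty, [])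
  (st.2, PySem.List.sorted2 st.1.items Prod.fst Prod.snd)

-- ===== PORT B =====
-- str.count of a single-character needle = List.count of that char (exact here)
def table1_alt (txt : String) : (List (Int × String × Int)) × (List (String × Int)) :=
  let cs := txt.toList
  let info := (PySem.List.enumerate cs).map
    (fun p => (p.1, String.ofList [p.2], ((PySem.List.slice cs none (some p.1)).count p.2 : Int)))
  let counts := PySem.List.sorted2
    ((PySem.Set.ofList cs).map (fun ch => (String.ofList [ch], (cs.count ch : Int) - 1)))
    Prod.fst Prod.snd
  (info, counts)

-- ===== PRECONDITION & SPEC =====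
def Spec_table1 (txt : String) (out : (List (Int × String × Int)) × (List (String × Int))) : Prop := out = table1_alt txt
instance (txt : String) (out : (List (Int × String × Int)) × (List (String × Int))) : Decidable (Spec_table1 txt out) := by unfold Spec_table1; infer_instance

-- ===== CLAIM (what is proved, stated in full; the proofs are below) =====
def Claim_equal_table1 : Prop := ∀ (txt : String), Dom_table1 txt → Spec_table1 txt (table1 txt)

-- ===== LEMMAS AND PROOFS =====

-- the dict's item list after processing prefix `pre`
def entryMap (pre : List Char) : List (String × Int) :=
  (PySem.Set.ofList pre).map (fun ch => (String.ofList [ch], (pre.count ch : Int) - 1))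

-- B's info list restricted to the first n positions
def infoMap (cs : List Char) (n : Nat) : List (Int × String × Int) :=
  (PySem.List.enumerate (cs.take n)).map
    (fun p => (p.1, String.ofList [p.2], ((PySem.List.slice cs none (some p.1)).count p.2 : Int)))

lemma ofList_single_inj (c c' : Char) : String.ofList [c] = String.ofList [c'] ↔ c = c' :=
  ⟨fun h => by simpa using congrArg String.toList h, fun h => h ▸ rfl⟩

lemma ofList_single_beq (c c' : Char) : (String.ofList [c] == String.ofList [c']) = (c == c') := by
  rcases Decidable.em (c = c') with h | h
  · simp [h]
  · simp [h, ofList_single_inj]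

lemma any_beq_eq_decide_mem (pre : List Char) (ch : Char) :
    (List.any pre fun x => x == ch) = decide (ch ∈ pre) := by
  induction pre with
  | nil => simp
  | cons y t ih =>
    by_cases h : y = ch
    · simp [h, ih]
    · simp only [List.any_cons, ih, List.mem_cons]
      rw [show (y == ch) = false from by simp [h],
          show decide (ch = y ∨ ch ∈ t) = decide (ch ∈ t) from by simp [Ne.symm h]]
      simp

lemma enumerate_append_single {α : Type} (xs : List α) (x : α) (s : Int) :
    PySem.List.enumerate (xs ++ [x]) s = PySem.List.enumerate xs s ++ [(s + xs.length, x)] := by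
  induction xs generalizing s with
  | nil => simp [PySem.List.enumerate]
  | cons y t ih => simp [PySem.List.enumerate, ih]; ring

lemma find?_beq_of_mem (s : List Char) (c : Char) (h : c ∈ s) : s.find? (· == c) = some c := by
  induction s with
  | nil => simp at h
  | cons y t ih =>
    by_cases hy : y = c
    · subst hy; simp
    · rw [List.find?_cons_of_neg (by simp [hy])]
      exact ih (by
        rcases List.mem_cons.1 h with h' | h'
        · exact absurd h'.symm hy
        · exact h')

lemma contains_entryMap (pre : List Char) (ch : Char) :
    (PySem.Dict.mk (entryMap pre)).contains (String.ofList [ch]) = pre.contains ch := by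
  simp only [PySem.Dict.contains, entryMap, List.any_map, Function.comp_def,
             ofList_single_beq, any_beq_eq_decide_mem, PySem.Set.mem_ofList,
             List.contains_eq_mem]

lemma getD_entryMap (pre : List Char) (ch : Char) (h : ch ∈ pre) :
    (PySem.Dict.mk (entryMap pre)).getD (String.ofList [ch]) 0 = (pre.count ch : Int) - 1 := by
  have hmem : ch ∈ PySem.Set.ofList pre := (PySem.Set.mem_ofList pre ch).2 h
  simp [PySem.Dict.getD, PySem.Dict.get?, entryMap, List.find?_map, Function.comp_def,
        ofList_single_beq, find?_beq_of_mem _ _ hmem]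

lemma ofList_append_single (pre : List Char) (ch : Char) :
    PySem.Set.ofList (pre ++ [ch]) = PySem.Set.add (PySem.Set.ofList pre) ch := by
  simp [PySem.Set.ofList]

lemma insert_entryMap_mem (pre : List Char) (ch : Char) (h : ch ∈ pre) :
    (PySem.Dict.mk (entryMap pre)).insert (String.ofList [ch]) ((pre.count ch : Int) - 1 + 1)
      = PySem.Dict.mk (entryMap (pre ++ [ch])) := by
  have hc : (PySem.Dict.mk (entryMap pre)).contains (String.ofList [ch]) = true := by
    rw [contains_entryMap]; simpa [List.contains_eq_mem] using h
  have hset : PySem.Set.add (PySem.Set.ofList pre) ch = PySem.Set.ofList pre := by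
    simp [PySem.Set.add, PySem.Set.contains, (PySem.Set.mem_ofList pre ch).2 h]
  simp only [PySem.Dict.insert, hc, if_pos]
  congr 1
  rw [entryMap, entryMap, ofList_append_single, hset, List.map_map]
  apply List.map_congr_left
  intro c _
  rcases Decidable.em (c = ch) with hce | hce
  · subst hce
    simp
  · simp [ofList_single_inj, hce, Ne.symm hce]

lemma insert_entryMap_not_mem (pre : List Char) (ch : Char) (h : ch ∉ pre) :
    (PySem.Dict.mk (entryMap pre)).insert (String.ofList [ch]) 0
      = PySem.Dict.mk (entryMap (pre ++ [ch])) := by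
  have hc : (PySem.Dict.mk (entryMap pre)).contains (String.ofList [ch]) = false := by
    rw [contains_entryMap]; simpa [List.contains_eq_mem] using h
  have hset : PySem.Set.add (PySem.Set.ofList pre) ch = PySem.Set.ofList pre ++ [ch] := by
    have : ch ∉ PySem.Set.ofList pre := fun hm => h ((PySem.Set.mem_ofList pre ch).1 hm)
    simp [PySem.Set.add, PySem.Set.contains, this]
  simp only [PySem.Dict.insert, hc, Bool.false_eq_true, if_neg, not_false_iff]
  congr 1
  rw [entryMap, entryMap, ofList_append_single, hset, List.map_append]
  congr 1
  · apply List.map_congr_left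
    intro c hcm
    have hce : c ≠ ch := fun hh => h (hh ▸ (PySem.Set.mem_ofList pre c).1 hcm)
    simp [Ne.symm hce]
  · simp [List.count_eq_zero_of_not_mem h]

-- the loop invariant: after the first n iterations the state is (entryMap of prefix, infoMap)
lemma table1_loop (txt : String) (n : Nat) (hn : n ≤ txt.toList.length) :
    (List.map (fun (k : Nat) => (k : Int)) (List.range n)).foldl (table1Step txt)
        (PySem.Dict.empty, [])
      = (PySem.Dict.mk (entryMap (txt.toList.take n)), infoMap txt.toList n) := by
  induction n with
  | zero => simp [entryMap, infoMap, PySem.Set.ofList, PySem.Set.empty, PySem.Dict.empty]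
  | succ n ih =>
    have hn' : n < txt.toList.length := hn
    rw [List.range_succ, List.map_append, List.foldl_append, ih (le_of_lt hn')]
    set cs := txt.toList with hcs
    set pre := cs.take n with hpre
    set ch := cs[n] with hch
    have hget : PySem.Str.pyGet? txt (n : Int) = some ch := by
      simp [← hcs, List.getElem?_eq_getElem hn', hch]
    have hlenpre : pre.length = n := by simp [hpre, le_of_lt hn']
    have htake : cs.take (n + 1) = pre ++ [ch] :=
      List.take_succ_eq_append_getElem hn'
    have hslice : PySem.List.slice cs none (some ((n : Nat) : Int)) = pre := by
      simp [PySem.List.slice_to_natCast (xs := cs) (b := n), hpre]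
    have hinfo : infoMap cs (n + 1)
        = infoMap cs n ++ [((n : Int), String.ofList [ch], (pre.count ch : Int))] := by
      rw [infoMap, infoMap, htake, enumerate_append_single, List.map_append, ← hpre]
      simp [hlenpre, hslice]
    rw [hinfo]
    simp only [List.map_cons, List.map_nil, List.foldl_cons, List.foldl_nil, table1Step, hget]
    by_cases hmem : ch ∈ pre
    · have hc : (PySem.Dict.mk (entryMap pre)).contains (String.ofList [ch]) = true := by
        rw [contains_entryMap]; simpa [List.contains_eq_mem] using hmem
      simp only [hc, if_pos, getD_entryMap pre ch hmem, insert_entryMap_mem pre ch hmem, ← htake]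
      have hmem' : ch ∈ cs.take (n + 1) := by rw [htake]; simp
      rw [getD_entryMap _ ch hmem', htake]
      simp
    · have hc : (PySem.Dict.mk (entryMap pre)).contains (String.ofList [ch]) = false := by
        rw [contains_entryMap]; simpa [List.contains_eq_mem] using hmem
      simp only [hc, Bool.false_eq_true, if_neg, not_false_iff,
                 insert_entryMap_not_mem pre ch hmem, ← htake]
      have hmem' : ch ∈ cs.take (n + 1) := by rw [htake]; simp
      rw [getD_entryMap _ ch hmem', htake]
      simp

-- ===== VERDICT (by name: the statement is the Claim_ definition above) =====
theorem table1_spec : Claim_equal_table1 := by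
  intro txt _
  unfold Spec_table1 table1 table1_alt
  simp only [PySem.Str.len, PySem.List.pyRange_zero_natCast]
  rw [table1_loop txt txt.toList.length (le_refl _)]
  have htl : List.take txt.length txt.toList = txt.toList := by
    have : txt.toList.length = txt.length := by simp
    rw [← this, List.take_length]
  simp [entryMap, infoMap, htl]
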